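-- pv_equiv track=rewrite | github.com/seekercorp/querypath | querypath/pivotter.py | apply_pivot
-- ===== SOURCE A (Python) =====
-- from typing import Any
--
-- def apply_pivot(rows: list[dict], index: str, columns: str, values: str) -> list[dict]:
--     """Pivot rows: group by index, spread unique column values as new columns."""
--     if not rows:
--         return []
--
--     grouped: dict[Any, dict] = {}
--     for row in rows:
--         key = row.get(index)
--         if key not in grouped:
--             grouped[key] = {index: key}
--         col_val = row.get(columns)
--         val = row.get(values)
--         if col_val is not None:
--             grouped[key][str(col_val)] = val
--
--     return list(grouped.values())
-- ===== SOURCE B (Python) =====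
-- def apply_pivot(rows: list[dict], index: str, columns: str, values: str) -> list[dict]:
--     """Pivot rows: collect distinct index keys in first-appearance order, then for
--     each key rescan the rows, spreading matching rows into that key's result dict."""
--     keys = []
--     for row in rows:
--         k = row.get(index)
--         if k not in keys:
--             keys.append(k)
--     result = []
--     for k in keys:
--         out = {index: k}
--         for row in rows:
--             if row.get(index) == k:
--                 cv = row.get(columns)
--                 if cv is not None:
--                     out[str(cv)] = row.get(values)
--         result.append(out)
--     return result
-- ===== Notes on version B (the rewrite author's own statement) =====
-- stated objective: alternative
-- what changed: A builds all result dicts simultaneously in one pass over a dict of partially-built outputs; B never builds a grouping table: it first collects the distinct index keys in first-appearance order, then for each key rescans the full row list and spreads only the matching rows into that key's result dict.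
-- outside the precondition, e.g. on apply_pivot([{}], 'i', 'c', 'v'): A returns [{'i': None}], B returns [{'i': None}]
import Mathlib
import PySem

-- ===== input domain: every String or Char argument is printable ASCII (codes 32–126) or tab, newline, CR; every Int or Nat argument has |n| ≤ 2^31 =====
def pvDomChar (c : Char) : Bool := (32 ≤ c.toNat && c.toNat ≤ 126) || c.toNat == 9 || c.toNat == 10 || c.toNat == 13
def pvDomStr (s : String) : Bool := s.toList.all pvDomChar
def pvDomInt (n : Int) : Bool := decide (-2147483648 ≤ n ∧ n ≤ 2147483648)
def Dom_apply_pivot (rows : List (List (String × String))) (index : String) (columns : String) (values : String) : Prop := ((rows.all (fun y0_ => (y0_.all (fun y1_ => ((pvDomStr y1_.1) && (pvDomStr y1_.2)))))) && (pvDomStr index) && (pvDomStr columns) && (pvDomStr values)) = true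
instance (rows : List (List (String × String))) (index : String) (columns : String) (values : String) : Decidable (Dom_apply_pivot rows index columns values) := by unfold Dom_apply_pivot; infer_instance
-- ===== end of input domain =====

-- B replaces A's single pass over a dict of partially-built result dicts by: collect the distinct
-- index keys in first-appearance order, then rescan all rows once per key to build that key's
-- result dict (objective: alternative algorithm — no grouping table at all; same results).


-- ===== PORT A =====
-- Transliteration of A. Under Pre_ every row has the index key and, whenever the columns key is
-- present, the values key too; the '.getD ""' defaults are therefore never taken inside Pre_ (they
-- stand for Python's None, which Pre_ excludes because None is not a String of the declared type).
def apply_pivot (rows : List (List (String × String))) (index : String) (columns : String) (values : String) : List (List (String × String)) :=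
  if rows = [] then []
  else
    let grouped : PySem.Dict String (PySem.Dict String String) :=
      rows.foldl (fun g row =>
        let key := ((PySem.Dict.mk row).get? index).getD ""          -- key = row.get(index)
        let g := if g.contains key then g
                 else g.insert key ((PySem.Dict.empty).insert index key)   -- grouped[key] = {index: key}
        match (PySem.Dict.mk row).get? columns with                  -- col_val = row.get(columns)
        | none => g
        | some cv =>                                                  -- grouped[key][str(col_val)] = val
            g.insert key ((g.getD key PySem.Dict.empty).insert cv
              (((PySem.Dict.mk row).get? values).getD "")))
        PySem.Dict.empty
    (grouped.values).map (fun d => d.items)                           -- list(grouped.values())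

-- ===== PORT B =====
-- Transliteration of Source B: pass 1 collects the distinct index keys in first-appearance order;
-- pass 2, for each key, rescans ALL rows and spreads the matching ones into that key's dict.
def apply_pivot_alt (rows : List (List (String × String))) (index : String) (columns : String) (values : String) : List (List (String × String)) :=
  let keys : List String :=
    rows.foldl (fun ks row =>
      let k := ((PySem.Dict.mk row).get? index).getD ""              -- k = row.get(index)
      if ks.contains k then ks else ks ++ [k]) []                    -- if k not in keys: keys.append(k)
  keys.map (fun k =>
    (rows.foldl (fun out row =>                                      -- for row in rows:
        if (((PySem.Dict.mk row).get? index).getD "") == k then      --   if row.get(index) == k: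
          match (PySem.Dict.mk row).get? columns with                --     cv = row.get(columns)
          | none => out
          | some cv => out.insert cv (((PySem.Dict.mk row).get? values).getD "")
        else out)
      ((PySem.Dict.empty).insert index k)).items)                    -- out = {index: k}

-- ===== PRECONDITION & SPEC =====
-- Pre_ excludes inputs on which A returns a dict containing Python's None (not a String, so not a
-- value of the declared type): a row missing the index key, or a row having the columns key but
-- missing the values key.
def Pre_apply_pivot (rows : List (List (String × String))) (index : String) (columns : String) (values : String) : Prop :=
  ∀ row ∈ rows, ((PySem.Dict.mk row).get? index).isSome = true ∧
    (((PySem.Dict.mk row).get? columns).isSome = true → ((PySem.Dict.mk row).get? values).isSome = true)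
instance (rows : List (List (String × String))) (index : String) (columns : String) (values : String) : Decidable (Pre_apply_pivot rows index columns values) := by unfold Pre_apply_pivot; infer_instance
def pvWitness_apply_pivot : (List (List (String × String))) × String × String × String :=
  ([[("i", "a"), ("c", "x"), ("v", "1")], [("i", "a"), ("c", "y"), ("v", "2")], [("i", "b"), ("v", "3")]], "i", "c", "v")

def Spec_apply_pivot (rows : List (List (String × String))) (index : String) (columns : String) (values : String) (out : List (List (String × String))) : Prop := out = apply_pivot_alt rows index columns values
instance (rows : List (List (String × String))) (index : String) (columns : String) (values : String) (out : List (List (String × String))) : Decidable (Spec_apply_pivot rows index columns values out) := by unfold Spec_apply_pivot; infer_instance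

-- ===== CLAIM (what is proved, stated in full; the proofs are below) =====
def Claim_equal_apply_pivot : Prop := ∀ (rows : List (List (String × String))) (index : String) (columns : String) (values : String), Dom_apply_pivot rows index columns values → Pre_apply_pivot rows index columns values → Spec_apply_pivot rows index columns values (apply_pivot rows index columns values)

-- ===== LEMMAS AND PROOFS =====

-- The index key of a row, as both ports compute it.
def pvKeyOf (index : String) (row : List (String × String)) : String :=
  ((PySem.Dict.mk row).get? index).getD ""

-- A's per-row state update (the body of A's fold), named for the proofs.
def pvStepA (index columns values : String) (g : PySem.Dict String (PySem.Dict String String))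
    (row : List (String × String)) : PySem.Dict String (PySem.Dict String String) :=
  let key := pvKeyOf index row
  let g := if g.contains key then g
           else g.insert key ((PySem.Dict.empty).insert index key)
  match (PySem.Dict.mk row).get? columns with
  | none => g
  | some cv =>
      g.insert key ((g.getD key PySem.Dict.empty).insert cv
        (((PySem.Dict.mk row).get? values).getD ""))

-- Proof-side grouping step: an auxiliary "key -> rows of that key so far" table used only to relate
-- A's interleaved fold with B's keys-then-filters decomposition.
def pvStepB (index : String) (g : PySem.Dict String (List (List (String × String))))
    (row : List (String × String)) : PySem.Dict String (List (List (String × String))) :=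
  g.insert (pvKeyOf index row) (g.getD (pvKeyOf index row) [] ++ [row])

-- B's key-collection fold, with an accumulator.
def pvKeys (index : String) (acc : List String) (rows : List (List (String × String))) : List String :=
  rows.foldl (fun ks row => if ks.contains (pvKeyOf index row) then ks else ks ++ [pvKeyOf index row]) acc

-- Spreading one group of rows into its result dict.
def pvSpread (index columns values : String) (k : String) (grp : List (List (String × String))) :
    PySem.Dict String String :=
  grp.foldl (fun out row =>
      match (PySem.Dict.mk row).get? columns with
      | none => out
      | some cv => out.insert cv (((PySem.Dict.mk row).get? values).getD ""))
    ((PySem.Dict.empty).insert index k)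

-- The simulation map: a (key, group) entry of the auxiliary table corresponds to A's entry.
def pvF (index columns values : String) (kg : String × List (List (String × String))) :
    String × PySem.Dict String String :=
  (kg.1, pvSpread index columns values kg.1 kg.2)

theorem pvSpread_append (index columns values k : String) (grp : List (List (String × String))) (row : List (String × String)) :
    pvSpread index columns values k (grp ++ [row]) =
      match (PySem.Dict.mk row).get? columns with
      | none => pvSpread index columns values k grp
      | some cv => (pvSpread index columns values k grp).insert cv (((PySem.Dict.mk row).get? values).getD "") := by
  simp [pvSpread, List.foldl_append]

-- One row: A's update of the simulated state is the simulation of the grouping update.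
theorem pvStep_one (index columns values : String) (row : List (String × String))
    (L : List (String × List (List (String × String)))) (hnd : (L.map Prod.fst).Nodup) :
    pvStepA index columns values (PySem.Dict.mk (L.map (pvF index columns values))) row
      = PySem.Dict.mk ((pvStepB index (PySem.Dict.mk L) row).items.map (pvF index columns values)) := by
  have hkeysA : (PySem.Dict.mk (L.map (pvF index columns values))).keys = L.map Prod.fst := by
    simp [PySem.Dict.keys, List.map_map, pvF]
  have hndB : (PySem.Dict.mk L).keys.Nodup := by simpa [PySem.Dict.keys] using hnd
  have hndA : (PySem.Dict.mk (L.map (pvF index columns values))).keys.Nodup := by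
    rw [hkeysA]; exact hnd
  set key := pvKeyOf index row with hkeydef
  have hcA : (PySem.Dict.mk (L.map (pvF index columns values))).contains key = decide (key ∈ L.map Prod.fst) := by
    rw [PySem.Dict.contains_eq_decide_mem_keys, hkeysA]
  have hcB : (PySem.Dict.mk L).contains key = decide (key ∈ L.map Prod.fst) := by
    rw [PySem.Dict.contains_eq_decide_mem_keys]; simp [PySem.Dict.keys]
  by_cases hk : key ∈ L.map Prod.fst
  · -- key already grouped
    obtain ⟨p, hpL, hp1⟩ := List.mem_map.1 hk
    obtain ⟨k0, grp⟩ := p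
    simp only at hp1; subst hp1
    have huniq : ∀ q ∈ L, q.1 = key → q = (key, grp) := by
      intro q hq hq1
      exact List.inj_on_of_nodup_map hnd hq hpL (by simpa using hq1)
    have hgB : (PySem.Dict.mk L).getD key [] = grp := PySem.Dict.getD_of_mem_items _ hpL hndB []
    have hgA : (PySem.Dict.mk (L.map (pvF index columns values))).getD key PySem.Dict.empty
        = pvSpread index columns values key grp := by
      exact PySem.Dict.getD_of_mem_items _ (List.mem_map_of_mem (f := pvF index columns values) hpL) hndA _
    have hBitems : (pvStepB index (PySem.Dict.mk L) row).items
        = L.map (fun q => if q.1 == key then (key, grp ++ [row]) else q) := by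
      rw [pvStepB]
      rw [PySem.Dict.items_insert_of_contains _ _ (by rw [hcB]; exact decide_eq_true hk)]
      rw [hgB]
    rw [hBitems]
    simp only [pvStepA]
    rw [if_pos (by rw [hcA]; exact decide_eq_true hk)]
    cases hcv : (PySem.Dict.mk row).get? columns with
    | none =>
      apply PySem.Dict.ext
      simp only [List.map_map]
      refine (List.map_congr_left ?_)
      intro q hq
      by_cases hq1 : q.1 = key
      · have : q = (key, grp) := huniq q hq hq1
        subst this
        simp [pvF, pvSpread_append, hcv]
      · simp [Function.comp, hq1]
    | some cv =>
      apply PySem.Dict.ext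
      rw [hgA]
      rw [PySem.Dict.items_insert_of_contains _ _ (by rw [hcA]; exact decide_eq_true hk)]
      simp only [List.map_map]
      refine (List.map_congr_left ?_)
      intro q hq
      by_cases hq1 : q.1 = key
      · have : q = (key, grp) := huniq q hq hq1
        subst this
        simp [pvF, pvSpread_append, hcv, ← hkeydef]
      · simp [Function.comp, pvF, ← hkeydef, hq1]
  · -- new key
    have hgB : (PySem.Dict.mk L).getD key [] = [] :=
      PySem.Dict.getD_of_not_contains _ _ (by rw [hcB]; exact decide_eq_false hk)
    have hBitems : (pvStepB index (PySem.Dict.mk L) row).items = L ++ [(key, [row])] := by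
      rw [pvStepB, PySem.Dict.items_insert_of_not_contains _ _ (by rw [hcB]; exact decide_eq_false hk), hgB]
      rfl
    rw [hBitems]
    simp only [pvStepA]
    rw [if_neg (by rw [hcA]; simp [hk])]
    have hg1items : ((PySem.Dict.mk (L.map (pvF index columns values))).insert key
        ((PySem.Dict.empty).insert index key)).items
        = L.map (pvF index columns values) ++ [(key, (PySem.Dict.empty).insert index key)] := by
      apply PySem.Dict.items_insert_of_not_contains _ _ (by rw [hcA]; exact decide_eq_false hk)
    cases hcv : (PySem.Dict.mk row).get? columns with
    | none =>
      apply PySem.Dict.ext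
      rw [hg1items]
      simp [pvF, pvSpread, hcv]
    | some cv =>
      apply PySem.Dict.ext
      rw [PySem.Dict.getD_insert_self]
      rw [PySem.Dict.items_insert_of_contains _ _ (PySem.Dict.contains_insert_self _ _ _)]
      rw [hg1items]
      simp only [List.map_append, List.map_map]
      congr 1
      · refine (List.map_congr_left ?_)
        intro q hq
        have hq1 : q.1 ≠ key := fun h => hk (h ▸ List.mem_map_of_mem hq)
        simp [Function.comp, pvF, ← hkeydef, hq1]
      · simp [pvF, pvSpread, hcv, ← hkeydef]

-- The whole loop: A's grouped dict is the pvF-image of the auxiliary grouping table.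
theorem pvMain (index columns values : String) :
    ∀ (rows : List (List (String × String))) (L : List (String × List (List (String × String)))),
      (L.map Prod.fst).Nodup →
      rows.foldl (pvStepA index columns values) (PySem.Dict.mk (L.map (pvF index columns values)))
        = PySem.Dict.mk ((rows.foldl (pvStepB index) (PySem.Dict.mk L)).items.map (pvF index columns values)) := by
  intro rows
  induction rows with
  | nil => intro L hnd; rfl
  | cons r rest ih =>
    intro L hnd
    simp only [List.foldl_cons]
    rw [pvStep_one index columns values r L hnd]
    have hnd' : (((pvStepB index (PySem.Dict.mk L) r).items.map Prod.fst)).Nodup := by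
      have := PySem.Dict.nodup_keys_insert (PySem.Dict.mk L)
        (pvKeyOf index r)
        ((PySem.Dict.mk L).getD (pvKeyOf index r) [] ++ [r])
        (by simpa [PySem.Dict.keys] using hnd)
      simpa [pvStepB, PySem.Dict.keys] using this
    exact ih (pvStepB index (PySem.Dict.mk L) r).items hnd'

-- The bridge: the auxiliary grouping table IS B's keys list paired with filters of the rows.
theorem pvBridge (index : String) :
    ∀ (rows : List (List (String × String))) (L : List (String × List (List (String × String)))),
      (L.map Prod.fst).Nodup →
      (rows.foldl (pvStepB index) (PySem.Dict.mk L)).items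
        = (pvKeys index (L.map Prod.fst) rows).map
            (fun k => (k, (PySem.Dict.mk L).getD k [] ++ rows.filter (fun r => pvKeyOf index r == k))) := by
  intro rows
  induction rows with
  | nil =>
    intro L hnd
    simp only [List.foldl_nil, pvKeys, List.filter_nil, List.append_nil]
    -- items of Dict.mk L mapped back from its own keys via getD
    have : ∀ q ∈ L, (fun k => (k, (PySem.Dict.mk L).getD k [])) q.1 = q := by
      intro q hq
      have hndB : (PySem.Dict.mk L).keys.Nodup := by simpa [PySem.Dict.keys] using hnd
      have := PySem.Dict.getD_of_mem_items (PySem.Dict.mk L) (k := q.1) (v := q.2) hq hndB []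
      simp [this]
    calc (PySem.Dict.mk L).items = L := rfl
      _ = (L.map Prod.fst).map (fun k => (k, (PySem.Dict.mk L).getD k [])) := by
          rw [List.map_map]
          exact (List.map_congr_left (by intro q hq; exact (this q hq).symm)).symm ▸ (List.map_id L).symm ▸ rfl
  | cons r rest ih =>
    intro L hnd
    set k0 := pvKeyOf index r with hk0
    set d1 := pvStepB index (PySem.Dict.mk L) r with hd1def
    have hd1 : d1 = PySem.Dict.mk d1.items := PySem.Dict.ext rfl
    have hnd1 : (d1.items.map Prod.fst).Nodup := by
      have := PySem.Dict.nodup_keys_insert (PySem.Dict.mk L) k0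
        ((PySem.Dict.mk L).getD k0 [] ++ [r])
        (by simpa [PySem.Dict.keys] using hnd)
      simpa [hd1def, pvStepB, PySem.Dict.keys] using this
    have hih := ih d1.items hnd1
    rw [← hd1] at hih
    simp only [List.foldl_cons, ← hd1def, hih]
    -- keys after one step
    have hkeys : d1.items.map Prod.fst
        = if (L.map Prod.fst).contains k0 then L.map Prod.fst else L.map Prod.fst ++ [k0] := by
      have hc : (PySem.Dict.mk L).contains k0 = (L.map Prod.fst).contains k0 := by
        rw [PySem.Dict.contains_eq_decide_mem_keys]
        simp [PySem.Dict.keys]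
      by_cases hk : (L.map Prod.fst).contains k0 = true
      · rw [if_pos hk]
        have := PySem.Dict.keys_insert_of_contains (PySem.Dict.mk L) (k := k0)
          ((PySem.Dict.mk L).getD k0 [] ++ [r]) (by rw [hc]; exact hk)
        simpa [hd1def, pvStepB, PySem.Dict.keys, ← hk0] using this
      · rw [if_neg hk]
        have := PySem.Dict.keys_insert_of_not_contains (PySem.Dict.mk L) (k := k0)
          ((PySem.Dict.mk L).getD k0 [] ++ [r]) (by rw [hc]; simpa using hk)
        simpa [hd1def, pvStepB, PySem.Dict.keys, ← hk0] using this
    have hkeysfold : pvKeys index (L.map Prod.fst) (r :: rest)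
        = pvKeys index (d1.items.map Prod.fst) rest := by
      simp only [pvKeys, List.foldl_cons, ← hk0, hkeys]
    rw [← hkeysfold]
    -- the entry function of the smaller call equals the entry function of the bigger call
    refine List.map_congr_left ?_
    intro k _
    have hstep : d1.getD k [] = (PySem.Dict.mk L).getD k [] ++ (if k0 == k then [r] else []) := by
      by_cases hkk : k = k0
      · subst hkk
        simp [hd1def, pvStepB, ← hk0, PySem.Dict.getD_insert_self]
      · have hne : (k0 == k) = false := beq_eq_false_iff_ne.mpr (fun h => hkk h.symm)
        simp [hd1def, pvStepB, ← hk0, PySem.Dict.getD_insert_of_ne _ _ _ hkk, hne]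
    have hfilt : (r :: rest).filter (fun q => pvKeyOf index q == k)
        = (if k0 == k then [r] else []) ++ rest.filter (fun q => pvKeyOf index q == k) := by
      by_cases hkk : (k0 == k) = true
      · simp [← hk0, hkk]
      · simp only [Bool.not_eq_true] at hkk
        simp [← hk0, hkk]
    rw [hstep, hfilt, List.append_assoc]

-- ===== VERDICT (by name: the statement is the Claim_ definition above) =====
theorem apply_pivot_spec : Claim_equal_apply_pivot := by
  intro rows index columns values _ _
  show apply_pivot rows index columns values = apply_pivot_alt rows index columns values
  by_cases h : rows = []
  · subst h; rfl
  · have hmain : rows.foldl (pvStepA index columns values) PySem.Dict.empty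
        = PySem.Dict.mk ((rows.foldl (pvStepB index) PySem.Dict.empty).items.map (pvF index columns values)) :=
      pvMain index columns values rows [] List.nodup_nil
    have hbr : (rows.foldl (pvStepB index) PySem.Dict.empty).items
        = (pvKeys index [] rows).map
            (fun k => (k, rows.filter (fun q => pvKeyOf index q == k))) := by
      have := pvBridge index rows [] List.nodup_nil
      simpa using this
    show (if rows = [] then []
      else ((rows.foldl (pvStepA index columns values) PySem.Dict.empty).values).map (fun d => d.items))
      = apply_pivot_alt rows index columns values
    rw [if_neg h, hmain, hbr]
    show _ = apply_pivot_alt rows index columns values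
    simp only [apply_pivot_alt]
    rw [show (rows.foldl (fun ks row =>
        let k := ((PySem.Dict.mk row).get? index).getD ""
        if ks.contains k then ks else ks ++ [k]) []) = pvKeys index [] rows from rfl]
    simp only [PySem.Dict.values, List.map_map]
    refine List.map_congr_left ?_
    intro k _
    simp only [Function.comp, pvF, pvSpread]
    rw [← PySem.List.foldl_if_eq_foldl_filter]
    rfl
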